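-- pv_equiv track=rewrite | github.com/isabert/google_foobar | level3/queue to do/solution.py | solution
-- ===== SOURCE A (Python) =====
-- def solution(start, length):
--     def xor_from_1(number):
--         #define f(n)= 1^2^...^n
--         #we will discover a rule... try: f(1), f(2),f(3),f(4),f(5)
--         mod= number%4
--         if(mod==0):
--             return number
--         if(mod==1):
--             return 1
--         if(mod==2):
--             return number+1
--         if(mod==3):
--             return 0
--
--         #also note x^x=0
--         #0^x = x
--
--     prev = start
--     res = 0
--     for i in range(length):
--         row_cnt = length-i
--         res ^=(xor_from_1(start+row_cnt-1)^xor_from_1(prev-1))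
--         start+=length
--         prev = start
--     return res
-- ===== SOURCE B (Python) =====
-- def solution(start, length):
--     def xor_range(a, m):
--         # XOR of the m consecutive integers a, a+1, ..., a+m-1:
--         # peel an odd head, each (even, odd) pair XORs to 1, plus a leftover element.
--         acc = 0
--         if m > 0 and a % 2:
--             acc, a, m = a, a + 1, m - 1
--         if (m // 2) % 2:
--             acc ^= 1
--         if m % 2:
--             acc ^= a + m - 1
--         return acc
--
--     # XOR the whole length x length bounding square at once, then cancel the
--     # unused tail of each row (row i keeps length-i IDs, its tail has i IDs):
--     # XORing a tail twice removes it, since x ^ x = 0.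
--     res = xor_range(start, length * length)
--     for i in range(length):
--         res ^= xor_range(start + (i + 1) * length - i, i)
--     return res
-- ===== Notes on version B (the rewrite author's own statement) =====
-- stated objective: alternative
-- what changed: A scans the staircase row by row, XORing each row's value from two mod-4 prefix-XOR lookups on a running start/prev state; B instead XORs the entire length-by-length bounding square in one range XOR and then cancels each row's unused tail via x^x=0, a complement decomposition of the grid with a pairing-based range XOR.
-- outside the precondition, e.g. on solution(0, -3): A returns 0, B returns 8
import Mathlib
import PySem

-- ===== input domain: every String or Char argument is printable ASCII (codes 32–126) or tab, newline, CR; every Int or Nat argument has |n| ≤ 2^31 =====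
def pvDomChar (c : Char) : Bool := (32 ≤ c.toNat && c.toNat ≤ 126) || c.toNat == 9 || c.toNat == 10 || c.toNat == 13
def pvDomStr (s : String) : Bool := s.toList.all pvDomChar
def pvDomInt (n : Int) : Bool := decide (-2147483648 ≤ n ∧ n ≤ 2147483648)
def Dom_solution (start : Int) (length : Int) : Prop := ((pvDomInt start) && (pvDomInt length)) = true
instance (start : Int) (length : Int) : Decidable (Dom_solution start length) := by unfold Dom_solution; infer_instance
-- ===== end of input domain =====

-- B replaces A's row-by-row prefix-XOR scan with a complement decomposition: XOR the whole
-- length×length bounding square in one range XOR, then cancel each row's unused tail via x^x=0.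

-- ===== PORT A =====
-- Python's inner helper xor_from_1; its mod==3 branch returns 0 — exact, since
-- number % 4 is always one of 0,1,2,3, the implicit fall-through is unreachable.
def xorFrom1 (number : Int) : Int :=
  let md := PySem.Int.mod number 4
  if md = 0 then number
  else if md = 1 then 1
  else if md = 2 then number + 1
  else 0

-- the body of A's for-loop, over the state (start, prev, res)
def pvAStep (length : Int) (st : Int × Int × Int) (i : Int) : Int × Int × Int :=
  let row_cnt := length - i
  let res := PySem.Int.bxor st.2.2
      (PySem.Int.bxor (xorFrom1 (st.1 + row_cnt - 1)) (xorFrom1 (st.2.1 - 1)))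
  let start' := st.1 + length
  (start', start', res)

def solution (start : Int) (length : Int) : Int :=
  ((PySem.List.pyRange 0 length 1).foldl (pvAStep length) (start, start, 0)).2.2

-- ===== PORT B =====
-- B's xor_range after the head-peeling if: straight-line code on (acc, a, m)
def xorCore (acc : Int) (a : Int) (m : Int) : Int :=
  let acc := if PySem.Int.mod (PySem.Int.floordiv m 2) 2 ≠ 0 then PySem.Int.bxor acc 1 else acc
  if PySem.Int.mod m 2 ≠ 0 then PySem.Int.bxor acc (a + m - 1) else acc

-- B's xor_range: the head-peeling branch reassigns (acc, a, m) = (a, a+1, m-1)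
def xorRange (a : Int) (m : Int) : Int :=
  if 0 < m ∧ PySem.Int.mod a 2 ≠ 0 then xorCore a (a + 1) (m - 1) else xorCore 0 a m

-- B's loop body: res ^= xor_range(start + (i+1)*length - i, i)  (the tail of row i)
def pvBStep (start : Int) (length : Int) (res : Int) (i : Int) : Int :=
  PySem.Int.bxor res (xorRange (start + (i + 1) * length - i) i)

def solution_alt (start : Int) (length : Int) : Int :=
  (PySem.List.pyRange 0 length 1).foldl (pvBStep start length)
    (xorRange start (length * length))

-- ===== PRECONDITION & SPEC =====
-- Pre_ restricts to the natural domain of a grid size (0 ≤ length): a negative length is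
-- not a grid; there A's loop body never runs (returns 0) while B XORs the length^2 square.
def Pre_solution (start : Int) (length : Int) : Prop := 0 ≤ length
instance (start : Int) (length : Int) : Decidable (Pre_solution start length) := by unfold Pre_solution; infer_instance
def pvWitness_solution : Int × Int := (17, 4)
def Spec_solution (start : Int) (length : Int) (out : Int) : Prop := out = solution_alt start length
instance (start : Int) (length : Int) (out : Int) : Decidable (Spec_solution start length out) := by unfold Spec_solution; infer_instance

-- ===== CLAIM (what is proved, stated in full; the proofs are below) =====
def Claim_equal_solution : Prop := ∀ (start : Int) (length : Int), Dom_solution start length → Pre_solution start length → Spec_solution start length (solution start length)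

-- ===== LEMMAS AND PROOFS =====

-- two's-complement encoding of an Int by a sign and a Nat: pvEnc false n = n, pvEnc true n = -n-1
def pvEnc (s : Bool) (n : Nat) : Int := if s then -(n : Int) - 1 else n

lemma pvEnc_surj (a : Int) : ∃ s n, a = pvEnc s n := by
  rcases le_or_gt 0 a with h | h
  · exact ⟨false, a.toNat, by simp [pvEnc, Int.toNat_of_nonneg h]⟩
  · exact ⟨true, (-a - 1).toNat, by simp [pvEnc]; omega⟩

-- Python's ^ on Int is sign-xor and Nat-xor through the encoding
lemma pvBxor_enc (s t : Bool) (m n : Nat) :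
    PySem.Int.bxor (pvEnc s m) (pvEnc t n) = pvEnc (xor s t) (m ^^^ n) := by
  cases s <;> cases t <;> simp [pvEnc, PySem.Int.bxor] <;>
    first
      | (intro h; exfalso; omega)
      | (rw [if_neg (by omega), if_neg (by omega)])

lemma pvBxor_assoc (a b c : Int) :
    PySem.Int.bxor (PySem.Int.bxor a b) c = PySem.Int.bxor a (PySem.Int.bxor b c) := by
  obtain ⟨s, m, rfl⟩ := pvEnc_surj a
  obtain ⟨t, n, rfl⟩ := pvEnc_surj b
  obtain ⟨u, k, rfl⟩ := pvEnc_surj c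
  simp [pvBxor_enc, Nat.xor_assoc]

lemma pvBxor_left_comm (a b c : Int) :
    PySem.Int.bxor a (PySem.Int.bxor b c) = PySem.Int.bxor b (PySem.Int.bxor a c) := by
  rw [← pvBxor_assoc, PySem.Int.bxor_comm a b, pvBxor_assoc]

lemma pvBxor_zero_left (a : Int) : PySem.Int.bxor 0 a = a := by
  rw [PySem.Int.bxor_comm]; exact PySem.Int.bxor_zero a

lemma pvBxor_self_cancel (a b : Int) : PySem.Int.bxor a (PySem.Int.bxor a b) = b := by
  rw [← pvBxor_assoc, PySem.Int.bxor_self, pvBxor_zero_left]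

-- 2k ^^^ 1 = 2k+1 on Nat
lemma pvNatXorOne_even (k : Nat) : (2 * k) ^^^ 1 = 2 * k + 1 := by
  apply Nat.eq_of_testBit_eq
  intro i
  cases i with
  | zero => simp [Nat.testBit_zero, Nat.mul_comm]
  | succ j => simp [Nat.testBit_succ, Nat.mul_comm 2 k]

lemma pvNatXorOne_odd (k : Nat) : (2 * k + 1) ^^^ 1 = 2 * k := by
  calc (2 * k + 1) ^^^ 1 = ((2 * k) ^^^ 1) ^^^ 1 := by rw [pvNatXorOne_even]
    _ = 2 * k := Nat.xor_xor_cancel_right _ _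

-- for even m, m ^ 1 = m + 1 (as Python ints, any sign)
lemma pvBxor_one_of_even (m : Int) (h : m % 2 = 0) : PySem.Int.bxor m 1 = m + 1 := by
  obtain ⟨s, n, rfl⟩ := pvEnc_surj m
  have h1 : (1 : Int) = pvEnc false 1 := by simp [pvEnc]
  rw [h1, pvBxor_enc]
  cases s with
  | false =>
    simp only [pvEnc, Bool.false_xor, if_neg (Bool.false_ne_true)] at h ⊢
    obtain ⟨k, rfl⟩ : ∃ k, n = 2 * k := ⟨n / 2, by omega⟩
    rw [pvNatXorOne_even]; push_cast; ring
  | true =>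
    simp only [pvEnc, if_true] at h ⊢
    have hodd : n % 2 = 1 := by omega
    obtain ⟨k, rfl⟩ : ∃ k, n = 2 * k + 1 := ⟨n / 2, by omega⟩
    simp only [Bool.true_xor, Bool.not_false]
    rw [pvNatXorOne_odd]; push_cast; ring

-- for odd m, m ^ 1 = m - 1
lemma pvBxor_one_of_odd (m : Int) (h : m % 2 = 1) : PySem.Int.bxor m 1 = m - 1 := by
  have he : PySem.Int.bxor (m - 1) 1 = m := by
    rw [pvBxor_one_of_even (m - 1) (by omega)]; ring
  calc PySem.Int.bxor m 1 = PySem.Int.bxor (PySem.Int.bxor (m - 1) 1) 1 := by rw [he]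
    _ = PySem.Int.bxor (m - 1) (PySem.Int.bxor 1 1) := pvBxor_assoc _ _ _
    _ = m - 1 := by rw [PySem.Int.bxor_self, PySem.Int.bxor_zero]

lemma pvMod4 (b : Int) : PySem.Int.mod b 4 = b % 4 := by
  simp [PySem.Int.mod, Int.fmod_eq_emod]

lemma pvMod2 (b : Int) : PySem.Int.mod b 2 = b % 2 := by
  simp [PySem.Int.mod, Int.fmod_eq_emod]

lemma pvFdiv2 (b : Int) : PySem.Int.floordiv b 2 = b / 2 := by
  simp [PySem.Int.floordiv, Int.fdiv_eq_ediv]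

-- the key fact behind A's lookup table: f(b) = f(b-1) ^ b for EVERY integer b
lemma pvXorFrom1_step (b : Int) : xorFrom1 b = PySem.Int.bxor (xorFrom1 (b - 1)) b := by
  have h4 : b % 4 = 0 ∨ b % 4 = 1 ∨ b % 4 = 2 ∨ b % 4 = 3 := by omega
  rcases h4 with h | h | h | h <;> simp only [xorFrom1, pvMod4, h]
  · rw [show (b-1) % 4 = 3 by omega]
    norm_num [pvBxor_zero_left]
  · rw [show (b-1) % 4 = 0 by omega]
    norm_num
    have h1 := pvBxor_one_of_even (b - 1) (by omega)
    calc (1:Int) = PySem.Int.bxor (b-1) (PySem.Int.bxor (b-1) 1) := (pvBxor_self_cancel _ _).symm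
      _ = PySem.Int.bxor (b-1) b := by rw [h1]; ring_nf
  · rw [show (b-1) % 4 = 1 by omega]
    norm_num
    rw [PySem.Int.bxor_comm, pvBxor_one_of_even b (by omega)]
  · rw [show (b-1) % 4 = 2 by omega]
    norm_num

-- xorCore threads its initial accumulator by a single xor at the front
lemma pvXorCore_shift (acc a m : Int) :
    xorCore acc a m = PySem.Int.bxor acc (xorCore 0 a m) := by
  simp only [xorCore]
  split_ifs <;>
    simp [pvBxor_assoc, pvBxor_zero_left]

-- for even a, B's pairing formula equals A's closed form for the row [a, a+m)
lemma pvXorCore_even (a m : Int) (ha : a % 2 = 0) :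
    xorCore 0 a m = PySem.Int.bxor (xorFrom1 (a + m - 1)) (xorFrom1 (a - 1)) := by
  have h4 : a % 4 = 0 ∨ a % 4 = 2 := by omega
  have hm4 : m % 4 = 0 ∨ m % 4 = 1 ∨ m % 4 = 2 ∨ m % 4 = 3 := by omega
  simp only [xorCore, xorFrom1, pvFdiv2, pvMod2, pvMod4]
  rcases h4 with ha4 | ha4 <;> rcases hm4 with hm4 | hm4 | hm4 | hm4
  · rw [if_neg (by omega), if_neg (by omega),
        show (a+m-1) % 4 = 3 by omega, show (a-1) % 4 = 3 by omega]
    norm_num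
  · rw [if_pos (by omega), if_neg (by omega),
        show (a+m-1) % 4 = 0 by omega, show (a-1) % 4 = 3 by omega]
    norm_num [pvBxor_zero_left]
  · rw [if_neg (by omega), if_pos (by omega),
        show (a+m-1) % 4 = 1 by omega, show (a-1) % 4 = 3 by omega]
    norm_num [pvBxor_zero_left]
  · rw [if_pos (by omega), if_pos (by omega),
        show (a+m-1) % 4 = 2 by omega, show (a-1) % 4 = 3 by omega]
    norm_num [pvBxor_zero_left]
    rw [PySem.Int.bxor_comm, pvBxor_one_of_even (a+m-1) (by omega)]
    ring
  · rw [if_neg (by omega), if_neg (by omega),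
        show (a+m-1) % 4 = 1 by omega, show (a-1) % 4 = 1 by omega]
    norm_num
  · rw [if_pos (by omega), if_neg (by omega),
        show (a+m-1) % 4 = 2 by omega, show (a-1) % 4 = 1 by omega]
    norm_num [pvBxor_zero_left]
    rw [pvBxor_one_of_odd (a+m) (by omega)]
  · rw [if_neg (by omega), if_pos (by omega),
        show (a+m-1) % 4 = 3 by omega, show (a-1) % 4 = 1 by omega]
    norm_num [pvBxor_zero_left]
  · rw [if_pos (by omega), if_pos (by omega),
        show (a+m-1) % 4 = 0 by omega, show (a-1) % 4 = 1 by omega]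
    norm_num [pvBxor_zero_left]
    rw [PySem.Int.bxor_comm]

-- B's xor_range equals A's closed form on any range of nonnegative size
lemma pvXorRange_eq (a m : Int) (hm : 0 ≤ m) :
    xorRange a m = PySem.Int.bxor (xorFrom1 (a + m - 1)) (xorFrom1 (a - 1)) := by
  have h2 : a % 2 = 0 ∨ a % 2 = 1 := by omega
  unfold xorRange
  rcases h2 with ha | ha
  · rw [if_neg (by rw [pvMod2]; omega)]
    exact pvXorCore_even a m ha
  · rcases eq_or_lt_of_le hm with hm0 | hm0
    · rw [if_neg (by omega), ← hm0]
      rw [show a + 0 - 1 = a - 1 by ring]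
      simp only [xorCore, pvFdiv2, pvMod2]
      norm_num [PySem.Int.bxor_self]
    · rw [if_pos ⟨hm0, by rw [pvMod2]; omega⟩, pvXorCore_shift,
          pvXorCore_even (a+1) (m-1) (by omega),
          show a+1+(m-1)-1 = a+m-1 by ring, show a+1-1 = a by ring,
          pvXorFrom1_step a]
      simp [pvBxor_left_comm, PySem.Int.bxor_comm, pvBxor_self_cancel]

-- the telescoping invariant: after n rows A's running start is s0 + n*len, and B's
-- accumulator (square XOR, tails of rows < n cancelled) differs from A's residue by
-- exactly the not-yet-covered block [s0 + n*len, s0 + len^2)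
lemma pvOuter (len s0 : Int) (n : Nat) (hn : (n : Int) ≤ len) :
    ((PySem.List.pyRange 0 (n : Int) 1).foldl (pvAStep len) (s0, s0, 0)).1 = s0 + n * len ∧
    ((PySem.List.pyRange 0 (n : Int) 1).foldl (pvAStep len) (s0, s0, 0)).2.1 = s0 + n * len ∧
    (PySem.List.pyRange 0 (n : Int) 1).foldl (pvBStep s0 len) (xorRange s0 (len * len))
      = PySem.Int.bxor
          (((PySem.List.pyRange 0 (n : Int) 1).foldl (pvAStep len) (s0, s0, 0)).2.2)
          (PySem.Int.bxor (xorFrom1 (s0 + len * len - 1)) (xorFrom1 (s0 + n * len - 1))) := by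
  induction n with
  | zero =>
    refine ⟨by simp [PySem.List.pyRange_one_eq_nil (le_refl (0:Int))],
            by simp [PySem.List.pyRange_one_eq_nil (le_refl (0:Int))], ?_⟩
    simp only [PySem.List.pyRange_one_eq_nil (le_refl (0:Int)), List.foldl_nil,
      Nat.cast_zero]
    rw [pvXorRange_eq s0 (len * len) (mul_self_nonneg len), pvBxor_zero_left,
        show s0 + (0:Int) * len - 1 = s0 - 1 by ring]
  | succ n ih =>
    have hn' : (n : Int) ≤ len := by push_cast at hn ⊢; omega
    obtain ⟨h1, h2, h3⟩ := ih hn'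
    have hc : ((n + 1 : Nat) : Int) = (n : Int) + 1 := by push_cast; ring
    rw [hc, PySem.List.pyRange_one_succ_right (by positivity)]
    rw [List.foldl_append, List.foldl_append]
    simp only [List.foldl]
    refine ⟨?_, ?_, ?_⟩
    · simp only [pvAStep]; rw [h1]; ring
    · simp only [pvAStep]; rw [h1]; ring
    · simp only [pvAStep, pvBStep]
      rw [h1, h2, h3]
      rw [pvXorRange_eq (s0 + ((n:Int) + 1) * len - (n:Int)) (n:Int) (by positivity)]
      rw [show s0 + ((n:Int)+1) * len - (n:Int) + (n:Int) - 1 = s0 + ((n:Int)+1) * len - 1 by ring,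
          show s0 + ((n:Int)+1) * len - (n:Int) - 1 = s0 + (n:Int) * len + (len - (n:Int)) - 1 by ring,
          show ((n:Int)+1) * len = (n:Int) * len + len by ring]
      simp [pvBxor_assoc, pvBxor_left_comm, PySem.Int.bxor_comm]

-- ===== VERDICT (by name: the statement is the Claim_ definition above) =====
theorem solution_spec : Claim_equal_solution := by
  intro start length _ hpre
  unfold Spec_solution solution solution_alt
  have hl : ((length.toNat : Nat) : Int) = length := Int.toNat_of_nonneg hpre
  obtain ⟨_, _, h3⟩ := pvOuter length start length.toNat (le_of_eq hl)
  rw [hl] at h3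
  rw [h3, PySem.Int.bxor_self, PySem.Int.bxor_zero]
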